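-- pv_equiv track=rewrite | github.com/coolzoa/INTRO_sequencesExercises | lab4.py | eliminateSpaces
-- ===== SOURCE A (Python) =====
-- def eliminateSpaces(inp: str) -> (str, int):
--     """
--     Input: a string
--     Output: the string without spaces and the number of spaces deleted
--     Process: we iterate through each index and check if it is a space,
--         if it is we increase the counter of spaces and delete it from result
--     Restrictions: input must be string
--     """
--     if (not isinstance(inp, str)):
--         return "Error, input must be string"
--     countSpaces = 0
--     result = str()
--     for element in inp:
--         if (element == " "):
--             countSpaces = countSpaces + 1
--         else:
--             result = result + element
--     return result,countSpaces
-- ===== SOURCE B (Python) =====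
-- def eliminateSpaces(inp: str) -> (str, int):
--     if (not isinstance(inp, str)):
--         return "Error, input must be string"
--     return ''.join(c for c in inp if c != ' '), inp.count(' ')
-- ===== Notes on version B (the rewrite author's own statement) =====
-- stated objective: idiomatic
-- what changed: Replaces the fused character loop with two mutable accumulators by two independent library-driven scans: a filtering join for the result and str.count for the number of spaces.
import Mathlib
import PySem

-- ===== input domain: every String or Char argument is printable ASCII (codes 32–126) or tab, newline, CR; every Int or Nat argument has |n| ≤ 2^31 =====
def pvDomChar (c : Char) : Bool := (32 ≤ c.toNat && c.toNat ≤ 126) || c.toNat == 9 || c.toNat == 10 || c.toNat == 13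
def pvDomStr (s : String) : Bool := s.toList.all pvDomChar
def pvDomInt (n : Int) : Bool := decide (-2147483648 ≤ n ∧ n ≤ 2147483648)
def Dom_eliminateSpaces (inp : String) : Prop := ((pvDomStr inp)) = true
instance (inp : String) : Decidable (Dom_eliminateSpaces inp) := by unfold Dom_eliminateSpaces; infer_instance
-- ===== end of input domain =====

-- B replaces A's fused character loop (two accumulators built by string concatenation)
-- with two independent library scans: a filtering join for the result and str.count(' ') for the count.


-- ===== PORT A =====
-- the isinstance guard cannot fire under the type convention (inp is always a string)
def eliminateSpaces (inp : String) : String × Int :=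
  let st := inp.toList.foldl
    (fun (st : Int × String) element =>
      if element == ' ' then (st.1 + 1, st.2) else (st.1, st.2 ++ String.ofList [element]))
    ((0 : Int), "")
  (st.2, st.1)

-- ===== PORT B =====
-- ''.join(c for c in inp if c != ' ') = join with empty separator over the kept characters
def eliminateSpaces_alt (inp : String) : String × Int :=
  (PySem.Str.join "" ((inp.toList.filter (fun c => c != ' ')).map (fun c => String.ofList [c])),
   (PySem.Str.count inp " " : Int))

-- ===== PRECONDITION & SPEC =====
def Spec_eliminateSpaces (inp : String) (out : String × Int) : Prop := out = eliminateSpaces_alt inp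
instance (inp : String) (out : String × Int) : Decidable (Spec_eliminateSpaces inp out) := by unfold Spec_eliminateSpaces; infer_instance

-- ===== CLAIM (what is proved, stated in full; the proofs are below) =====
def Claim_equal_eliminateSpaces : Prop := ∀ (inp : String), Dom_eliminateSpaces inp → Spec_eliminateSpaces inp (eliminateSpaces inp)

-- ===== LEMMAS AND PROOFS =====

-- Chars.count.go with a single-character needle counts occurrences of that character
theorem countGo_single (c : Char) (l : List Char) (fuel acc : Nat) (h : l.length ≤ fuel) :
    PySem.Chars.count.go [c] fuel l acc = acc + l.count c := by
  induction l generalizing fuel acc with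
  | nil => cases fuel <;> simp [PySem.Chars.count.go]
  | cons x t ih =>
      cases fuel with
      | zero => simp at h
      | succ n =>
        simp only [PySem.Chars.count.go, List.isPrefixOf]
        by_cases hx : x = c
        · subst hx
          simp only [BEq.rfl, Bool.true_and, if_pos, List.length_cons,
            List.length_nil, Nat.zero_add, List.drop_succ_cons, List.drop_zero] at *
          rw [ih n (acc + 1) (by omega)]
          simp; omega
        · have : (c == x) = false := by simp [beq_eq_false_iff_ne]; exact fun e => hx e.symm
          simp only [this, Bool.false_and, if_neg Bool.false_ne_true]
          rw [ih n acc (by simpa using Nat.le_of_succ_le_succ h)]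
          simp [hx]

theorem count_single (c : Char) (l : List Char) :
    PySem.Chars.count l [c] = l.count c := by
  simpa [PySem.Chars.count] using countGo_single c l l.length 0 le_rfl

-- A's fused fold = (count of spaces, prefix ++ kept characters)
theorem foldA (l : List Char) (k : Int) (s : String) :
    l.foldl (fun (st : Int × String) element =>
        if element == ' ' then (st.1 + 1, st.2) else (st.1, st.2 ++ String.ofList [element])) (k, s)
      = (k + (l.count ' ' : Int), s ++ String.ofList (l.filter (fun c => c != ' '))) := by
  induction l generalizing k s with
  | nil =>
      refine Prod.ext (by simp) ?_
      apply String.ext; simp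
  | cons x t ih =>
      by_cases hx : x = ' '
      · subst hx
        simp only [List.foldl_cons, BEq.rfl, if_pos, ih, List.count_cons, List.filter_cons]
        simp; omega
      · have hb : (x == ' ') = false := by simpa [beq_eq_false_iff_ne] using hx
        simp only [List.foldl_cons, hb, Bool.false_eq_true, if_false, ih, Prod.mk.injEq]
        constructor
        · simp [List.count_cons, hb]
        · apply String.ext
          simp [hx]

-- ===== VERDICT (by name: the statement is the Claim_ definition above) =====
theorem eliminateSpaces_spec : Claim_equal_eliminateSpaces := by
  intro inp _
  unfold Spec_eliminateSpaces eliminateSpaces eliminateSpaces_alt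
  rw [foldA]
  refine Prod.ext ?_ ?_
  · apply String.ext
    simp [PySem.Str.toList_join, List.map_map, Function.comp_def, String.toList_ofList,
      PySem.Chars.join_nil_singletons]
  · simp [PySem.Str.count_eq, count_single]
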